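-- pv_equiv track=rewrite | github.com/SSoder/Twitter-Stream-mongo | app/tweet.py | filter_brands
-- ===== SOURCE A (Python) =====
-- def filter_brands(text):
--     brands = [
--         "@MadTreeBrewing",
--         "@Rhinegeist",
--         "@BraxtonBrewCo",
--         "@MoerleinLH",
--         "@TaftsBrewingCo",
--         "#cincy",
--         "#COVID19",
--         "#Zelda35th"
--     ]
--
--     for brand in brands:
--         if (brand in text):
--             text = text.replace(brand, "<mark>{}</mark>".format(brand))
--         else:
--             continue
--     return text
-- ===== SOURCE B (Python) =====
-- def filter_brands(text):
--     brands = [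
--         "@MadTreeBrewing",
--         "@Rhinegeist",
--         "@BraxtonBrewCo",
--         "@MoerleinLH",
--         "@TaftsBrewingCo",
--         "#cincy",
--         "#COVID19",
--         "#Zelda35th"
--     ]
--     # single left-to-right pass: at each position wrap the brand that starts
--     # there (at most one can), instead of eight full scans of the text
--     out = []
--     i = 0
--     n = len(text)
--     while i < n:
--         hit = next((b for b in brands if text.startswith(b, i)), None)
--         if hit is not None:
--             out.append("<mark>" + hit + "</mark>")
--             i += len(hit)
--         else:
--             out.append(text[i])
--             i += 1
--     return "".join(out)
-- ===== Notes on version B (the rewrite author's own statement) =====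
-- stated objective: alternative
-- what changed: Replaces the eight sequential full-text str.replace scans (each rebuilding the whole string) by a single left-to-right pass that, at each position, wraps the unique brand starting there or copies the character; correct because no brand is a prefix of another and the inserted <mark> wrapper can never create or hide a brand occurrence.
import Mathlib
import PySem

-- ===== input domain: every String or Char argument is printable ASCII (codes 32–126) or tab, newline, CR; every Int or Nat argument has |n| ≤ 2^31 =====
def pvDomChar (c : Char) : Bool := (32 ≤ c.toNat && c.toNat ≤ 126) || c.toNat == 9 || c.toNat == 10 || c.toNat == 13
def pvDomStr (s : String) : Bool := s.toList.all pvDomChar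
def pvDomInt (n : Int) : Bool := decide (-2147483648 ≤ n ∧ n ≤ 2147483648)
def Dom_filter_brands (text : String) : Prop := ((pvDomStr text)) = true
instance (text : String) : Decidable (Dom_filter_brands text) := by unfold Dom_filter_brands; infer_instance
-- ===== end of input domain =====

-- B replaces A's eight sequential full-text str.replace passes with one left-to-right scan
-- that wraps the unique brand starting at each position (objective: alternative algorithm,
-- same cost class; equal because no brand is a prefix of another and the <mark> wrapper
-- never creates or hides a brand occurrence).

-- ===== PORT A =====
def pvBrandsA : List String :=
  ["@MadTreeBrewing", "@Rhinegeist", "@BraxtonBrewCo", "@MoerleinLH",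
   "@TaftsBrewingCo", "#cincy", "#COVID19", "#Zelda35th"]

def filter_brands (text : String) : String :=
  pvBrandsA.foldl
    (fun t brand =>
      if PySem.Str.isIn brand t then
        PySem.Str.replace t brand ("<mark>" ++ brand ++ "</mark>")
      else t)
    text

-- ===== PORT B =====
def pvBrandsB : List (List Char) :=
  ["@MadTreeBrewing".toList, "@Rhinegeist".toList, "@BraxtonBrewCo".toList, "@MoerleinLH".toList,
   "@TaftsBrewingCo".toList, "#cincy".toList, "#COVID19".toList, "#Zelda35th".toList]

def pvMkL : List Char := ['<', 'm', 'a', 'r', 'k', '>']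
def pvMkR : List Char := ['<', '/', 'm', 'a', 'r', 'k', '>']

-- "<mark>" + b + "</mark>"
def pvWrap (b : List Char) : List Char := pvMkL ++ b ++ pvMkR

-- the single left-to-right pass of Source B: at each position, the first brand that
-- starts there (text.startswith(b, i)) is wrapped and skipped, else the char is copied
def pvScan (B : List (List Char)) : List Char → List Char
  | [] => []
  | c :: cs =>
    match B.find? (fun b => b.isPrefixOf (c :: cs)) with
    | some (q :: qs) => pvWrap (q :: qs) ++ pvScan B (cs.drop qs.length)
    | _ => c :: pvScan B cs
  termination_by t => t.length
  decreasing_by all_goals (simp; try omega)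

def filter_brands_alt (text : String) : String :=
  String.ofList (pvScan pvBrandsB text.toList)

-- ===== PRECONDITION & SPEC =====
def Spec_filter_brands (text : String) (out : String) : Prop := out = filter_brands_alt text
instance (text : String) (out : String) : Decidable (Spec_filter_brands text out) := by unfold Spec_filter_brands; infer_instance

-- ===== CLAIM (what is proved, stated in full; the proofs are below) =====
def Claim_equal_filter_brands : Prop := ∀ (text : String), Dom_filter_brands text → Spec_filter_brands text (filter_brands text)

-- ===== LEMMAS AND PROOFS =====

-- a brand's first char; '@' and '#' start every brand and occur nowhere else in a brand / the wrapper
def pvMarker (c : Char) : Bool := c = '@' || c = '#'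

-- nonempty, marker head, tail free of markers and of '<'
def pvGood : List Char → Bool
  | [] => false
  | m :: t => pvMarker m && t.all (fun c => !pvMarker c && c != '<')

-- single-pattern replace as a clean scanner (the shape of CPython's str.replace)
def pvRepl (m : Char) (bt : List Char) (w : List Char) : List Char → List Char
  | [] => []
  | c :: cs =>
    if (m :: bt).isPrefixOf (c :: cs) then w ++ pvRepl m bt w (cs.drop bt.length)
    else c :: pvRepl m bt w cs
  termination_by t => t.length
  decreasing_by all_goals (simp; try omega)

theorem pvGo_eq (m : Char) (bt w : List Char) :
    ∀ (fuel : Nat) (s acc : List Char), s.length ≤ fuel →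
      PySem.Chars.replace.go (m :: bt) w fuel s acc = acc.reverse ++ pvRepl m bt w s := by
  intro fuel
  induction fuel with
  | zero =>
    intro s acc hs
    have : s = [] := by
      cases s with
      | nil => rfl
      | cons a t => simp at hs
    subst this
    rw [PySem.Chars.replace.go.eq_def]
    simp [pvRepl]
  | succ f ih =>
    intro s acc hs
    cases s with
    | nil =>
      rw [PySem.Chars.replace.go.eq_def]
      simp [pvRepl]
    | cons c t =>
      rw [PySem.Chars.replace.go.eq_def]
      simp only []
      by_cases hp : (m :: bt).isPrefixOf (c :: t) = true
      · rw [if_pos hp]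
        rw [ih _ _ (by simp at hs ⊢; omega)]
        rw [pvRepl, if_pos hp]
        simp
      · rw [if_neg hp]
        rw [ih _ _ (by simp at hs ⊢; omega)]
        rw [pvRepl, if_neg hp]
        simp

theorem pvReplace_eq (m : Char) (bt w s : List Char) :
    PySem.Chars.replace s (m :: bt) w = pvRepl m bt w s := by
  rw [PySem.Chars.replace]
  simp only [List.isEmpty_cons, if_false, Bool.false_eq_true]
  exact pvGo_eq m bt w s.length s [] (le_refl _)

theorem pvNorep (m : Char) (bt w : List Char) :
    ∀ s : List Char, (∀ j, ¬ (m :: bt) <+: s.drop j) → pvRepl m bt w s = s := by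
  intro s
  induction s with
  | nil => intro _; rw [pvRepl]
  | cons c cs ih =>
    intro h
    rw [pvRepl]
    rw [if_neg (by
      intro hp
      exact h 0 (by simpa using List.isPrefixOf_iff_prefix.mp hp))]
    rw [ih (fun j => by simpa using h (j + 1))]

theorem pvStep_eq (m : Char) (bt w s : List Char) :
    (if PySem.Chars.isIn (m :: bt) s = true then PySem.Chars.replace s (m :: bt) w else s)
      = pvRepl m bt w s := by
  by_cases h : PySem.Chars.isIn (m :: bt) s = true
  · rw [if_pos h, pvReplace_eq]
  · rw [if_neg h]
    refine (pvNorep m bt w s ?_).symm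
    intro j hj
    exact h ((PySem.Chars.exists_prefix_drop_iff_isIn _ _).mp ⟨j, hj⟩)

-- copying a marker-free block through pvRepl
theorem pvRepl_copy (m : Char) (bt w : List Char) (hm : pvMarker m = true) :
    ∀ (v u : List Char), (∀ c ∈ v, pvMarker c = false) → pvRepl m bt w (v ++ u) = v ++ pvRepl m bt w u := by
  intro v
  induction v with
  | nil => intro u _; simp
  | cons c v' ih =>
    intro u hv
    rw [List.cons_append, pvRepl]
    rw [if_neg (by
      simp only [List.isPrefixOf]
      intro hp
      simp at hp
      have := hv c (by simp)
      rw [hp.1] at hm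
      rw [this] at hm
      exact absurd hm (by simp))]
    rw [ih u (fun c hc => hv c (by simp [hc]))]
    simp

-- copying a marker-free block through pvScan
theorem pvScan_copy (B : List (List Char)) (hB : ∀ b ∈ B, pvGood b = true) :
    ∀ (v u : List Char), (∀ c ∈ v, pvMarker c = false) → pvScan B (v ++ u) = v ++ pvScan B u := by
  intro v
  induction v with
  | nil => intro u _; simp
  | cons c v' ih =>
    intro u hv
    rw [List.cons_append, pvScan]
    have hfind : B.find? (fun b => b.isPrefixOf (c :: (v' ++ u))) = none := by
      rw [List.find?_eq_none]
      intro b hb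
      have hg := hB b hb
      cases b with
      | nil => simp [pvGood] at hg
      | cons bm bts =>
        simp only [pvGood, Bool.and_eq_true] at hg
        simp only [List.isPrefixOf]
        intro hp
        simp at hp
        have := hv c (by simp)
        rw [← hp.1] at this
        rw [this] at hg
        exact absurd hg.1 (by simp)
    rw [hfind]
    show c :: pvScan B (v' ++ u) = c :: v' ++ pvScan B u
    rw [ih u (fun c hc => hv c (by simp [hc]))]
    simp

-- a '<'-free prefix of the scan output is a prefix of the input
theorem pvScan_prefix (B : List (List Char)) (hB : ∀ b ∈ B, pvGood b = true) :
    ∀ (u q : List Char), (∀ ch ∈ q, ch ≠ '<') → q <+: pvScan B u → q <+: u := by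
  intro u
  induction u with
  | nil =>
    intro q hq h
    rw [pvScan] at h
    exact h
  | cons c cs ih =>
    intro q hq h
    rw [pvScan] at h
    cases hf : B.find? (fun b => b.isPrefixOf (c :: cs)) with
    | some b =>
      rw [hf] at h
      have hb := hB b (List.mem_of_find?_eq_some hf)
      cases b with
      | nil => simp [pvGood] at hb
      | cons bm bts =>
        cases q with
        | nil => exact List.nil_prefix
        | cons ch q' =>
          exfalso
          simp only [pvWrap, pvMkL, List.append_assoc, List.cons_append] at h
          rw [List.cons_prefix_cons] at h
          exact hq ch (by simp) h.1
    | none =>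
      rw [hf] at h
      cases q with
      | nil => exact List.nil_prefix
      | cons ch q' =>
        rw [List.cons_prefix_cons] at h ⊢
        exact ⟨h.1, ih q' (fun x hx => hq x (by simp [hx])) h.2⟩

-- unfolding helpers for pvScan on a cons cell
theorem pvScan_cons_some (L : List (List Char)) (c : Char) (cs : List Char) (q : Char) (qs : List Char)
    (h : L.find? (fun b => b.isPrefixOf (c :: cs)) = some (q :: qs)) :
    pvScan L (c :: cs) = pvWrap (q :: qs) ++ pvScan L (cs.drop qs.length) := by
  rw [pvScan, h]

theorem pvScan_cons_none (L : List (List Char)) (c : Char) (cs : List Char)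
    (h : L.find? (fun b => b.isPrefixOf (c :: cs)) = none) :
    pvScan L (c :: cs) = c :: pvScan L cs := by
  rw [pvScan, h]

-- core commutation: replacing p2 after scanning with B is scanning with B ++ [p2]
set_option maxRecDepth 4096 in
theorem pvComm (B : List (List Char)) (hB : ∀ b ∈ B, pvGood b = true)
    (m : Char) (bt : List Char) (hp2 : pvGood (m :: bt) = true)
    (hnp : ∀ b ∈ B, ¬ b <+: (m :: bt) ∧ ¬ (m :: bt) <+: b) :
    ∀ t : List Char, pvRepl m bt (pvWrap (m :: bt)) (pvScan B t) = pvScan (B ++ [m :: bt]) t := by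
  have hm : pvMarker m = true := by
    simp only [pvGood, Bool.and_eq_true] at hp2; exact hp2.1
  have hbt : ∀ c ∈ bt, pvMarker c = false ∧ c ≠ '<' := by
    intro c hc
    simp only [pvGood, Bool.and_eq_true, List.all_eq_true] at hp2
    have := hp2.2 c hc
    simp at this
    exact ⟨by simp [this.1], this.2⟩
  have hbtm : ∀ x ∈ bt, pvMarker x = false := fun x hx => (hbt x hx).1
  have hlt : ∀ ch ∈ (m :: bt), ch ≠ '<' := by
    intro ch hch
    rcases List.mem_cons.mp hch with h | h
    · rw [h]
      have h' : m = '@' ∨ m = '#' := by simpa [pvMarker] using hm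
      rcases h' with h' | h' <;> (rw [h']; decide)
    · exact (hbt ch h).2
  have hnoprefix : ∀ (b : List Char), b ∈ B → ∀ (z : List Char), ¬ (m :: bt) <+: b ++ z := by
    intro b hb z h
    rcases List.prefix_or_prefix_of_prefix h (List.prefix_append b z) with h' | h'
    · exact (hnp b hb).2 h'
    · exact (hnp b hb).1 h'
  suffices H : ∀ (n : Nat) (t : List Char), t.length ≤ n →
      pvRepl m bt (pvWrap (m :: bt)) (pvScan B t) = pvScan (B ++ [m :: bt]) t by
    intro t; exact H t.length t (le_refl _)
  intro n
  induction n with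
  | zero =>
    intro t ht
    have : t = [] := by cases t with | nil => rfl | cons a b => simp at ht
    subst this
    rw [pvScan, pvScan, pvRepl]
  | succ n ih =>
    intro t ht
    cases t with
    | nil => rw [pvScan, pvScan, pvRepl]
    | cons c cs =>
      cases hf : B.find? (fun b => b.isPrefixOf (c :: cs)) with
      | some b =>
        have hbmem := List.mem_of_find?_eq_some hf
        have hbgood := hB b hbmem
        cases b with
        | nil => simp [pvGood] at hbgood
        | cons bm bts =>
          have hbts : ∀ x ∈ bts, pvMarker x = false := by
            intro x hx
            simp only [pvGood, Bool.and_eq_true, List.all_eq_true] at hbgood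
            have := hbgood.2 x hx
            simp at this
            simp [this.1]
          have hfR : (B ++ [m :: bt]).find? (fun b => b.isPrefixOf (c :: cs)) = some (bm :: bts) := by
            rw [List.find?_append, hf]; rfl
          rw [pvScan_cons_some B c cs bm bts hf, pvScan_cons_some _ c cs bm bts hfR]
          rw [show pvWrap (bm :: bts) ++ pvScan B (cs.drop bts.length)
                = pvMkL ++ (bm :: (bts ++ (pvMkR ++ pvScan B (cs.drop bts.length)))) from by
              simp [pvWrap, pvMkL, pvMkR]]
          rw [pvRepl_copy m bt _ hm pvMkL _ (by intro x hx; fin_cases hx <;> rfl)]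
          rw [pvRepl]
          rw [if_neg (by
            intro hp
            have h1 := List.isPrefixOf_iff_prefix.mp hp
            have h2 : bm :: (bts ++ (pvMkR ++ pvScan B (cs.drop bts.length)))
                = (bm :: bts) ++ (pvMkR ++ pvScan B (cs.drop bts.length)) := by simp
            rw [h2] at h1
            exact hnoprefix (bm :: bts) hbmem _ h1)]
          rw [pvRepl_copy m bt _ hm bts _ hbts]
          rw [pvRepl_copy m bt _ hm pvMkR _ (by intro x hx; fin_cases hx <;> rfl)]
          rw [ih (cs.drop bts.length) (by simp at ht ⊢; omega)]
          simp [pvWrap, pvMkL, pvMkR]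
      | none =>
        by_cases hpre : (m :: bt) <+: (c :: cs)
        · -- p2 matches at the head of t
          obtain ⟨r, hr⟩ := hpre
          rw [List.cons_append] at hr
          injection hr with h1 h2
          subst h1
          have hfR : (B ++ [m :: bt]).find? (fun b => b.isPrefixOf (m :: cs)) = some (m :: bt) := by
            rw [List.find?_append, hf, Option.none_or]
            rw [List.find?_cons_of_pos (by
              exact List.isPrefixOf_iff_prefix.mpr ⟨r, by rw [List.cons_append, h2]⟩)]
          rw [pvScan_cons_none B m cs hf, pvScan_cons_some _ m cs m bt hfR]
          rw [← h2, pvScan_copy B hB bt r hbtm]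
          rw [pvRepl]
          rw [if_pos (List.isPrefixOf_iff_prefix.mpr ⟨pvScan B r, by simp⟩)]
          rw [List.drop_left]
          rw [ih r (by
            have hlen : bt.length + r.length = cs.length := by rw [← h2]; simp
            simp at ht; omega)]
          rw [List.drop_left]
        · -- no brand matches at the head of t
          have hp2f : (m :: bt).isPrefixOf (c :: cs) = false := by
            rw [Bool.eq_false_iff]
            intro hp
            exact hpre (List.isPrefixOf_iff_prefix.mp hp)
          have hfR : (B ++ [m :: bt]).find? (fun b => b.isPrefixOf (c :: cs)) = none := by
            rw [List.find?_append, hf, Option.none_or]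
            rw [List.find?_cons_of_neg (by simp [hp2f]), List.find?_nil]
          rw [pvScan_cons_none B c cs hf, pvScan_cons_none _ c cs hfR]
          rw [pvRepl]
          rw [if_neg (by
            intro hp
            have h1 : (m :: bt) <+: pvScan B (c :: cs) := by
              rw [pvScan_cons_none B c cs hf]
              exact List.isPrefixOf_iff_prefix.mp hp
            exact hpre (pvScan_prefix B hB (c :: cs) (m :: bt) hlt h1))]
          rw [ih cs (by simp at ht; omega)]

theorem pvScan_nil : ∀ t : List Char, pvScan [] t = t := by
  intro t
  induction t with
  | nil => rw [pvScan]
  | cons c cs ih => rw [pvScan_cons_none [] c cs List.find?_nil, ih]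

theorem pvFold_eq : ∀ (bs : List (List Char)), (∀ b ∈ bs, pvGood b = true) →
    List.Pairwise (fun p q => ¬ p <+: q ∧ ¬ q <+: p) bs →
    ∀ t : List Char,
      List.foldl (fun s b => if PySem.Chars.isIn b s = true then PySem.Chars.replace s b (pvWrap b) else s) t bs
        = pvScan bs t := by
  intro bs
  induction bs using List.reverseRecOn with
  | nil => intro _ _ t; rw [List.foldl_nil, pvScan_nil]
  | append_singleton B p ihB =>
    intro hB hP t
    have hBg : ∀ b ∈ B, pvGood b = true := fun b hb => hB b (List.mem_append_left _ hb)
    have hpg : pvGood p = true := hB p (by simp)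
    have hPp := List.pairwise_append.mp hP
    have hnp : ∀ b ∈ B, ¬ b <+: p ∧ ¬ p <+: b := fun b hb => hPp.2.2 b hb p (by simp)
    rw [List.foldl_append, List.foldl_cons, List.foldl_nil]
    rw [ihB hBg hPp.1 t]
    cases p with
    | nil => simp [pvGood] at hpg
    | cons m bt =>
      rw [pvStep_eq m bt (pvWrap (m :: bt)) (pvScan B t)]
      exact pvComm B hBg m bt hpg hnp t

-- the wrapper string of A's port, char-level
theorem pvWrap_toList (b : String) :
    ("<mark>" ++ b ++ "</mark>").toList = pvWrap b.toList := by
  rw [String.toList_append, String.toList_append, pvWrap]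
  rw [show "<mark>".toList = pvMkL from by decide, show "</mark>".toList = pvMkR from by decide]

-- A's String-level fold computes, on .toList, the char-level fold
theorem pvBridge : ∀ (bs : List String) (t : String),
    (bs.foldl (fun t brand =>
        if PySem.Str.isIn brand t then PySem.Str.replace t brand ("<mark>" ++ brand ++ "</mark>") else t) t).toList
      = List.foldl (fun s b => if PySem.Chars.isIn b s = true then PySem.Chars.replace s b (pvWrap b) else s)
          t.toList (bs.map String.toList) := by
  intro bs
  induction bs with
  | nil => intro t; rfl
  | cons b bs ih =>
    intro t
    rw [List.map_cons, List.foldl_cons, List.foldl_cons]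
    rw [ih (if PySem.Str.isIn b t then PySem.Str.replace t b ("<mark>" ++ b ++ "</mark>") else t)]
    congr 1
    by_cases h : PySem.Chars.isIn b.toList t.toList = true
    · rw [if_pos h, if_pos (show PySem.Str.isIn b t = true from h)]
      rw [PySem.Str.toList_replace, pvWrap_toList]
    · rw [if_neg h, if_neg (show ¬ PySem.Str.isIn b t = true from h)]

theorem pvBrands_map : pvBrandsA.map String.toList = pvBrandsB := by decide

theorem pvBrands_good : ∀ b ∈ pvBrandsB, pvGood b = true := by
  rw [← List.all_eq_true]
  rfl

def pvNonpre (p q : List Char) : Bool := !p.isPrefixOf q && !q.isPrefixOf p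

theorem pvBrands_pairwise : List.Pairwise (fun p q => ¬ p <+: q ∧ ¬ q <+: p) pvBrandsB := by
  have h : pvBrandsB.Pairwise (fun p q => pvNonpre p q = true) := by decide
  refine h.imp ?_
  intro p q hpq
  simp only [pvNonpre, Bool.and_eq_true, Bool.not_eq_true'] at hpq
  constructor
  · intro hp
    rw [← List.isPrefixOf_iff_prefix] at hp
    rw [hpq.1] at hp
    exact absurd hp (by simp)
  · intro hp
    rw [← List.isPrefixOf_iff_prefix] at hp
    rw [hpq.2] at hp
    exact absurd hp (by simp)

-- ===== VERDICT (by name: the statement is the Claim_ definition above) =====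
theorem filter_brands_spec : Claim_equal_filter_brands := by
  intro text _
  unfold Spec_filter_brands filter_brands filter_brands_alt
  rw [String.ext_iff, String.toList_ofList]
  rw [pvBridge pvBrandsA text, pvBrands_map]
  exact pvFold_eq pvBrandsB pvBrands_good pvBrands_pairwise text.toList
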